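-- pv_equiv track=rewrite | github.com/pypi-data/pypi-mirror-189 | packages/fmdt-python/fmdt_python-0.0.1.tar.gz/fmdt_python-0.0.1/utils.py | separate_meteor_sequences
-- ===== SOURCE A (Python) =====
-- def separate_meteor_sequences(tracking_list: list[dict], frame_buffer = 5) -> list[tuple[int, int]]:
--     """
--     Take a tracking list and compute the disparate sequences of meteors
--
--     If two meteors are within frame_buffer frames of each other, consider them as part of the
--     same sequence
--     """
--
--     # Let's convert the tracking list into a list of (start_frame, end_frame) tuples
--     start_end = [(obj["start_frame"], obj["end_frame"]) for obj in tracking_list]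
--
--     # Now condense overlapping sequences
--     start_end_condensed = [start_end[0]]
--     ci = 0 # condensed index, will not always be equal to i
--     for i in range(len(start_end) - 1):
--
--         # If the end frame of one meteor is close to the start frame of the next, condense the two sequences
--         if (start_end_condensed[ci][1] + frame_buffer > start_end[i + 1][0]):
--             start_end_condensed[ci] = (start_end_condensed[ci][0], start_end[i + 1][1])
--         else:
--             ci = ci + 1
--             start_end_condensed.append(start_end[i + 1])
--
--     return start_end_condensed
-- ===== SOURCE B (Python) =====
-- def separate_meteor_sequences(tracking_list: list, frame_buffer=5) -> list:
--     """Staged passes: compute all break positions between consecutive raw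
--     intervals first, then emit one merged tuple per boundary segment by
--     random access into the raw interval list."""
--     intervals = [(obj["start_frame"], obj["end_frame"]) for obj in tracking_list]
--     breaks = [i for i, (prev, nxt) in enumerate(zip(intervals, intervals[1:]), start=1)
--               if prev[1] + frame_buffer <= nxt[0]]
--     edges = [0] + breaks + [len(intervals)]
--     return [(intervals[a][0], intervals[b - 1][1]) for a, b in zip(edges, edges[1:])]
-- ===== Notes on version B (the rewrite author's own statement) =====
-- stated objective: alternative
-- what changed: Replaces A's single in-place merge loop over a mutating condensed list with two staged passes: first compute the list of break positions between consecutive raw intervals, then build each merged tuple by random access at the segment boundaries.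
import Mathlib
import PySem

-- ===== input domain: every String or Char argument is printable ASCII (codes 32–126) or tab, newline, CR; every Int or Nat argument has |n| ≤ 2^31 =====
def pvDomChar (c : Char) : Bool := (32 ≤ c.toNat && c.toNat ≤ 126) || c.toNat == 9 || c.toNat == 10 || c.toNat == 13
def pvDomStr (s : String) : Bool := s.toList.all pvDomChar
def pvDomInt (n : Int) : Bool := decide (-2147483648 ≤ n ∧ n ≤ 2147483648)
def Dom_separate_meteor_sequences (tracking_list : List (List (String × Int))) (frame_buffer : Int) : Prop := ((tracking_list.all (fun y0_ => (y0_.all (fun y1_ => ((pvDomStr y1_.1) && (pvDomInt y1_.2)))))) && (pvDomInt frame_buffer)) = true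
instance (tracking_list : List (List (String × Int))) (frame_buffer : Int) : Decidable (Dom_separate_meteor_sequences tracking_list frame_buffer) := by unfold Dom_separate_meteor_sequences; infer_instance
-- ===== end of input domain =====

-- B replaces A's single in-place merge loop (mutating condensed list indexed by ci) with two
-- staged passes: compute all break positions between consecutive raw intervals, then emit each
-- merged tuple by boundary-index access (objective: alternative decomposition, same cost).


-- ===== PORT A =====
-- obj["start_frame"], obj["end_frame"]: first-match dict lookup; Pre_ guarantees the keys
-- are present, so the default 0 is never read on admitted inputs.
def pvLookupSE (obj : List (String × Int)) : Int × Int :=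
  ((PySem.Dict.mk obj).getD "start_frame" 0, (PySem.Dict.mk obj).getD "end_frame" 0)

-- one iteration of A's loop body: state = (start_end_condensed, ci); nxt = start_end[i+1]
def pvStepA (frame_buffer : Int) (st : List (Int × Int) × Nat) (nxt : Int × Int) : List (Int × Int) × Nat :=
  let cur := st.1.getD st.2 (0, 0)
  if cur.2 + frame_buffer > nxt.1 then
    (st.1.set st.2 (cur.1, nxt.2), st.2)
  else
    (st.1 ++ [nxt], st.2 + 1)

def separate_meteor_sequences (tracking_list : List (List (String × Int))) (frame_buffer : Int) : List (Int × Int) :=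
  let start_end := tracking_list.map pvLookupSE
  -- start_end[0]: IndexError on empty input is excluded by Pre_; headD's default is never read there
  let init : List (Int × Int) := [start_end.headD (0, 0)]
  -- for i in range(len(start_end)-1): the loop reads exactly start_end[1..] in order
  ((start_end.drop 1).foldl (pvStepA frame_buffer) (init, 0)).1

-- ===== PORT B =====
-- [i for i, (prev, nxt) in enumerate(zip(intervals, intervals[1:]), start=1) if prev[1]+fb <= nxt[0]]
def pvBreaks (frame_buffer : Int) (intervals : List (Int × Int)) : List Int :=
  (PySem.List.enumerate (intervals.zip (intervals.drop 1)) 1).filterMap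
    (fun p => if p.2.1.2 + frame_buffer ≤ p.2.2.1 then some p.1 else none)

-- (intervals[a][0], intervals[b-1][1]); on admitted inputs every index is in range,
-- so the pyGetD default (0,0) is never read
def pvEmit (intervals : List (Int × Int)) (ab : Int × Int) : Int × Int :=
  ((PySem.List.pyGetD intervals ab.1 (0, 0)).1, (PySem.List.pyGetD intervals (ab.2 - 1) (0, 0)).2)

def separate_meteor_sequences_alt (tracking_list : List (List (String × Int))) (frame_buffer : Int) : List (Int × Int) :=
  let intervals := tracking_list.map pvLookupSE
  let breaks := pvBreaks frame_buffer intervals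
  let edges := [(0 : Int)] ++ breaks ++ [(intervals.length : Int)]
  (edges.zip (edges.drop 1)).map (pvEmit intervals)

-- ===== PRECONDITION & SPEC =====
-- Pre_ excludes exactly the inputs where Python A raises: the empty list (IndexError on
-- start_end[0]) and any element dict missing the "start_frame" or "end_frame" key (KeyError).
def Pre_separate_meteor_sequences (tracking_list : List (List (String × Int))) (frame_buffer : Int) : Prop :=
  tracking_list ≠ [] ∧ ∀ obj ∈ tracking_list,
    (PySem.Dict.mk obj).contains "start_frame" = true ∧ (PySem.Dict.mk obj).contains "end_frame" = true
instance (tracking_list : List (List (String × Int))) (frame_buffer : Int) : Decidable (Pre_separate_meteor_sequences tracking_list frame_buffer) := by unfold Pre_separate_meteor_sequences; infer_instance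

def pvWitness_separate_meteor_sequences : (List (List (String × Int))) × Int :=
  ([[("start_frame", 1), ("end_frame", 3)], [("start_frame", 10), ("end_frame", 12)]], 5)

def Spec_separate_meteor_sequences (tracking_list : List (List (String × Int))) (frame_buffer : Int) (out : List (Int × Int)) : Prop := out = separate_meteor_sequences_alt tracking_list frame_buffer
instance (tracking_list : List (List (String × Int))) (frame_buffer : Int) (out : List (Int × Int)) : Decidable (Spec_separate_meteor_sequences tracking_list frame_buffer out) := by unfold Spec_separate_meteor_sequences; infer_instance

-- ===== CLAIM (what is proved, stated in full; the proofs are below) =====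
def Claim_equal_separate_meteor_sequences : Prop := ∀ (tracking_list : List (List (String × Int))) (frame_buffer : Int), Dom_separate_meteor_sequences tracking_list frame_buffer → Pre_separate_meteor_sequences tracking_list frame_buffer → Spec_separate_meteor_sequences tracking_list frame_buffer (separate_meteor_sequences tracking_list frame_buffer)

-- ===== LEMMAS AND PROOFS =====

-- common reference: the recursive merge both programs compute
def pvMerge (fb : Int) : (Int × Int) → List (Int × Int) → List (Int × Int)
  | cur, [] => [cur]
  | cur, q :: rest =>
    if cur.2 + fb > q.1 then pvMerge fb (cur.1, q.2) rest else cur :: pvMerge fb q rest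

-- B's second stage as a function of the full edge list
def pvPairs (P : List (Int × Int)) (es : List Int) : List (Int × Int) :=
  (es.zip (es.drop 1)).map (pvEmit P)

-- ---- A-side: the fold is pvMerge ----
lemma pvFoldA (fb : Int) : ∀ (L : List (Int × Int)) (res : List (Int × Int)) (gs ge : Int),
    (L.foldl (pvStepA fb) (res ++ [(gs, ge)], res.length)).1 = res ++ pvMerge fb (gs, ge) L := by
  intro L
  induction L with
  | nil => intro res gs ge; simp [pvMerge]
  | cons nxt L ih =>
    intro res gs ge
    by_cases h : ge + fb > nxt.1
    · have hA : pvStepA fb (res ++ [(gs, ge)], res.length) nxt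
          = (res ++ [(gs, nxt.2)], res.length) := by simp [pvStepA, h]
      simpa [List.foldl_cons, hA, pvMerge, h] using ih res gs nxt.2
    · have hA : pvStepA fb (res ++ [(gs, ge)], res.length) nxt
          = ((res ++ [(gs, ge)]) ++ [nxt], (res ++ [(gs, ge)]).length) := by simp [pvStepA, h]
      simpa [List.foldl_cons, hA, pvMerge, h] using ih (res ++ [(gs, ge)]) nxt.1 nxt.2

-- ---- B-side: index shift facts ----
lemma pvGetD_cons_shift (c : Int × Int) (T : List (Int × Int)) (i : Int) (hi : 0 ≤ i)
    (d : Int × Int) : PySem.List.pyGetD (c :: T) (i + 1) d = PySem.List.pyGetD T i d := by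
  obtain ⟨k, rfl⟩ : ∃ k : Nat, i = (k : Int) := ⟨i.toNat, by omega⟩
  have h1 : ((k : Int) + 1) = ((k + 1 : Nat) : Int) := by push_cast; ring
  rw [h1, PySem.List.pyGetD_natCast, PySem.List.pyGetD_natCast]
  simp

-- heads with equal second components are interchangeable for the .2 projection
lemma pvGetD_snd_congr (a b : Int × Int) (hab : a.2 = b.2) (T : List (Int × Int)) (i : Int)
    (hi : 0 ≤ i) : (PySem.List.pyGetD (a :: T) i (0, 0)).2 = (PySem.List.pyGetD (b :: T) i (0, 0)).2 := by
  rcases eq_or_lt_of_le hi with h0 | h0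
  · rw [← h0]; simp [PySem.List.pyGetD_zero_cons, hab]
  · have : i = (i - 1) + 1 := by ring
    rw [this, pvGetD_cons_shift a T (i - 1) (by omega), pvGetD_cons_shift b T (i - 1) (by omega)]

-- the enumerate start offset turns into a map (+1) on the kept indices
lemma pvEnumShift {α : Type} (c : α → Prop) [DecidablePred c] :
    ∀ (xs : List α) (s : Int),
      (PySem.List.enumerate xs (s + 1)).filterMap (fun p => if c p.2 then some p.1 else none)
        = ((PySem.List.enumerate xs s).filterMap (fun p => if c p.2 then some p.1 else none)).map (· + 1) := by
  intro xs
  induction xs with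
  | nil => intro s; simp [PySem.List.enumerate_nil]
  | cons x xs ih =>
    intro s
    rw [PySem.List.enumerate_cons, PySem.List.enumerate_cons]
    by_cases hx : c x
    · simp only [List.filterMap_cons, hx, if_pos]
      rw [ih (s + 1)]
      simp
    · simp only [List.filterMap_cons, hx, if_neg, not_false_iff]
      exact ih (s + 1)

-- structure of the break list on a two-element head
lemma pvBreaks_cons (fb : Int) (cur q : Int × Int) (R : List (Int × Int)) :
    pvBreaks fb (cur :: q :: R)
      = (if cur.2 + fb ≤ q.1 then [(1 : Int)] else []) ++ (pvBreaks fb (q :: R)).map (· + 1) := by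
  unfold pvBreaks
  have hz : (cur :: q :: R).zip ((cur :: q :: R).drop 1) = (cur, q) :: (q :: R).zip R := by simp
  have hz2 : (q :: R).zip ((q :: R).drop 1) = (q :: R).zip R := by simp
  rw [hz, hz2, PySem.List.enumerate_cons, List.filterMap_cons]
  have h12 := pvEnumShift (fun y : (Int × Int) × (Int × Int) => y.1.2 + fb ≤ y.2.1) ((q :: R).zip R) 1
  norm_num at h12
  by_cases hc : cur.2 + fb ≤ q.1 <;> simp [hc, h12]

-- the break list only reads the head's second component
lemma pvBreaks_head_congr (fb : Int) (a b : Int × Int) (hab : a.2 = b.2) (R : List (Int × Int)) :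
    pvBreaks fb (a :: R) = pvBreaks fb (b :: R) := by
  cases R with
  | nil => simp [pvBreaks]
  | cons r R' => rw [pvBreaks_cons, pvBreaks_cons, hab]

-- every break position lies in [1, |P| - 1]
lemma pvBreaks_mem (fb : Int) (P : List (Int × Int)) (x : Int) (hx : x ∈ pvBreaks fb P) :
    1 ≤ x ∧ x + 1 ≤ (P.length : Int) := by
  unfold pvBreaks at hx
  obtain ⟨p, hp, hkeep⟩ := List.mem_filterMap.mp hx
  rw [PySem.List.mem_enumerate_iff] at hp
  obtain ⟨k, hk, rfl⟩ := hp
  simp only [Option.ite_none_right_eq_some, Option.some.injEq] at hkeep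
  have hx1 : x = 1 + (k : Int) := hkeep.2.symm
  have hlen : (P.zip (P.drop 1)).length ≤ P.length - 1 := by
    simp [List.length_zip]
  omega

-- dropping a fresh head shifts every edge by one
lemma pvPairs_shift (c : Int × Int) (T : List (Int × Int)) :
    ∀ es : List Int, (∀ x ∈ es, 0 ≤ x) → (∀ x ∈ es.drop 1, 1 ≤ x) →
      pvPairs (c :: T) (es.map (· + 1)) = pvPairs T es := by
  intro es
  induction es with
  | nil => intro _ _; simp [pvPairs]
  | cons e0 rest ih =>
    intro h0 h1
    cases rest with
    | nil => simp [pvPairs]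
    | cons e1 rest' =>
      have he0 : 0 ≤ e0 := h0 e0 (by simp)
      have he1 : 1 ≤ e1 := h1 e1 (by simp)
      have hemit : pvEmit (c :: T) (e0 + 1, e1 + 1) = pvEmit T (e0, e1) := by
        unfold pvEmit
        rw [show e1 + 1 - 1 = (e1 - 1) + 1 by ring,
          pvGetD_cons_shift c T e0 he0, pvGetD_cons_shift c T (e1 - 1) (by omega)]
      have htail := ih (fun x hx => by have := h1 x hx; omega)
        (fun x hx => h1 x (List.mem_cons_of_mem e1 hx))
      simp only [pvPairs, List.map_cons, List.drop_one, List.tail_cons, List.zip_cons_cons,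
        List.map_cons] at htail ⊢
      rw [hemit, htail]

-- collapsing a merged pair of head intervals (tail edges, all ≥ 1)
lemma pvPairs_shift2aux (cur q : Int × Int) (R : List (Int × Int)) :
    ∀ es : List Int, (∀ x ∈ es, 1 ≤ x) →
      pvPairs (cur :: q :: R) (es.map (· + 1)) = pvPairs ((cur.1, q.2) :: R) es := by
  intro es
  induction es with
  | nil => intro _; simp [pvPairs]
  | cons e0 rest ih =>
    intro h1
    cases rest with
    | nil => simp [pvPairs]
    | cons e1 rest' =>
      have he0 : 1 ≤ e0 := h1 e0 (by simp)
      have he1 : 1 ≤ e1 := h1 e1 (by simp [List.mem_cons])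
      have hemit : pvEmit (cur :: q :: R) (e0 + 1, e1 + 1) = pvEmit ((cur.1, q.2) :: R) (e0, e1) := by
        unfold pvEmit
        have hfst : PySem.List.pyGetD (cur :: q :: R) (e0 + 1) (0, 0)
            = PySem.List.pyGetD ((cur.1, q.2) :: R) e0 (0, 0) := by
          rw [pvGetD_cons_shift cur (q :: R) e0 (by omega),
            show e0 = (e0 - 1) + 1 by ring,
            pvGetD_cons_shift q R (e0 - 1) (by omega),
            pvGetD_cons_shift (cur.1, q.2) R (e0 - 1) (by omega)]
        have hsnd : (PySem.List.pyGetD (cur :: q :: R) (e1 + 1 - 1) (0, 0)).2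
            = (PySem.List.pyGetD ((cur.1, q.2) :: R) (e1 - 1) (0, 0)).2 := by
          rw [show e1 + 1 - 1 = (e1 - 1) + 1 by ring,
            pvGetD_cons_shift cur (q :: R) (e1 - 1) (by omega)]
          exact pvGetD_snd_congr q (cur.1, q.2) rfl R (e1 - 1) (by omega)
        rw [hfst, hsnd]
      have htail := ih (fun x hx => h1 x (List.mem_cons_of_mem e0 hx))
      simp only [pvPairs, List.map_cons, List.drop_one, List.tail_cons, List.zip_cons_cons,
        List.map_cons] at htail ⊢
      rw [hemit, htail]

lemma pvPairs_shift2 (cur q : Int × Int) (R : List (Int × Int)) (es : List Int)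
    (h1 : ∀ x ∈ es, 1 ≤ x) :
    pvPairs (cur :: q :: R) ((0 : Int) :: es.map (· + 1)) = pvPairs ((cur.1, q.2) :: R) (0 :: es) := by
  cases es with
  | nil => simp [pvPairs]
  | cons e0 rest =>
    have he0 : 1 ≤ e0 := h1 e0 (by simp)
    have hemit : pvEmit (cur :: q :: R) (0, e0 + 1) = pvEmit ((cur.1, q.2) :: R) (0, e0) := by
      unfold pvEmit
      have hfst : (PySem.List.pyGetD (cur :: q :: R) 0 (0, 0)).1
          = (PySem.List.pyGetD ((cur.1, q.2) :: R) 0 (0, 0)).1 := by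
        simp [PySem.List.pyGetD_zero_cons]
      have hsnd : (PySem.List.pyGetD (cur :: q :: R) (e0 + 1 - 1) (0, 0)).2
          = (PySem.List.pyGetD ((cur.1, q.2) :: R) (e0 - 1) (0, 0)).2 := by
        rw [show e0 + 1 - 1 = (e0 - 1) + 1 by ring,
          pvGetD_cons_shift cur (q :: R) (e0 - 1) (by omega)]
        exact pvGetD_snd_congr q (cur.1, q.2) rfl R (e0 - 1) (by omega)
      rw [Prod.ext_iff]; exact ⟨hfst, hsnd⟩
    have htail := pvPairs_shift2aux cur q R (e0 :: rest) h1
    simp only [pvPairs, List.map_cons, List.drop_one, List.tail_cons, List.zip_cons_cons,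
      List.map_cons] at htail ⊢
    rw [hemit, htail]

-- ---- the main B-side characterisation ----
lemma pvMainB (fb : Int) : ∀ (M : List (Int × Int)) (cur : Int × Int),
    pvPairs (cur :: M) ((0 : Int) :: pvBreaks fb (cur :: M) ++ [((cur :: M).length : Int)])
      = pvMerge fb cur M := by
  intro M
  induction M with
  | nil =>
    intro cur
    simp [pvPairs, pvBreaks, pvEmit, pvMerge, PySem.List.pyGetD_zero_cons]
  | cons q R ih =>
    intro cur
    by_cases hc : cur.2 + fb ≤ q.1
    · -- break between cur and q: emit cur, recurse on q :: R
      have hes : (0 : Int) :: pvBreaks fb (cur :: q :: R) ++ [((cur :: q :: R).length : Int)]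
          = (0 : Int) :: ((0 : Int) :: pvBreaks fb (q :: R) ++ [((q :: R).length : Int)]).map (· + 1) := by
        rw [pvBreaks_cons]
        simp [hc]
      rw [hes]
      have hshift := pvPairs_shift cur (q :: R)
        ((0 : Int) :: pvBreaks fb (q :: R) ++ [((q :: R).length : Int)])
        (by
          intro x hx
          rcases List.mem_cons.mp hx with hx | hx
          · omega
          · rcases List.mem_append.mp hx with hx | hx
            · exact le_of_lt (by have := pvBreaks_mem fb (q :: R) x hx; omega)
            · simp at hx; omega)
        (by
          intro x hx
          simp only [List.drop_one] at hx
          rcases List.mem_append.mp hx with hx | hx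
          · exact (pvBreaks_mem fb (q :: R) x hx).1
          · simp at hx; simp [hx])
      have hhead : pvEmit (cur :: q :: R) (0, 1) = cur := by
        simp [pvEmit, PySem.List.pyGetD_zero_cons]
      have hmerge : pvMerge fb cur (q :: R) = cur :: pvMerge fb q R := by
        have hng : ¬ (cur.2 + fb > q.1) := by omega
        simp [pvMerge, hng]
      calc pvPairs (cur :: q :: R)
            ((0 : Int) :: ((0 : Int) :: pvBreaks fb (q :: R) ++ [((q :: R).length : Int)]).map (· + 1))
          = pvEmit (cur :: q :: R) (0, 1)
              :: pvPairs (cur :: q :: R)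
                (((0 : Int) :: pvBreaks fb (q :: R) ++ [((q :: R).length : Int)]).map (· + 1)) := by
            simp [pvPairs]
        _ = cur :: pvPairs (q :: R) ((0 : Int) :: pvBreaks fb (q :: R) ++ [((q :: R).length : Int)]) := by
            rw [hhead, hshift]
        _ = cur :: pvMerge fb q R := by rw [ih q]
        _ = pvMerge fb cur (q :: R) := hmerge.symm
    · -- cur and q merge: collapse the head pair
      have hes : (0 : Int) :: pvBreaks fb (cur :: q :: R) ++ [((cur :: q :: R).length : Int)]
          = (0 : Int) :: (pvBreaks fb (q :: R) ++ [((q :: R).length : Int)]).map (· + 1) := by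
        rw [pvBreaks_cons]
        simp [hc]
      rw [hes]
      have hshift := pvPairs_shift2 cur q R (pvBreaks fb (q :: R) ++ [((q :: R).length : Int)])
        (by
          intro x hx
          rcases List.mem_append.mp hx with hx | hx
          · exact (pvBreaks_mem fb (q :: R) x hx).1
          · simp at hx; simp [hx])
      have hbr : pvBreaks fb (q :: R) = pvBreaks fb ((cur.1, q.2) :: R) :=
        pvBreaks_head_congr fb q (cur.1, q.2) rfl R
      have hlen2 : ((q :: R).length : Int) = (((cur.1, q.2) :: R).length : Int) := by simp
      have hmerge : pvMerge fb cur (q :: R) = pvMerge fb (cur.1, q.2) R := by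
        have hg : cur.2 + fb > q.1 := by omega
        simp [pvMerge, hg]
      rw [hshift, hmerge]
      have h2 := ih (cur.1, q.2)
      rw [← hbr, ← hlen2] at h2
      exact h2

-- ---- assembly ----
lemma pvPorts_eq (tracking_list : List (List (String × Int))) (frame_buffer : Int)
    (hne : tracking_list ≠ []) :
    separate_meteor_sequences tracking_list frame_buffer
      = separate_meteor_sequences_alt tracking_list frame_buffer := by
  unfold separate_meteor_sequences separate_meteor_sequences_alt
  cases h : tracking_list.map pvLookupSE with
  | nil => exact absurd (List.map_eq_nil_iff.mp h) hne
  | cons p L =>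
    have hA : (L.foldl (pvStepA frame_buffer) ([p], 0)).1 = pvMerge frame_buffer p L := by
      have := pvFoldA frame_buffer L [] p.1 p.2
      simpa using this
    have hB := pvMainB frame_buffer L p
    simp only [List.drop_one, List.tail_cons, List.headD_cons]
    rw [hA, ← hB]
    simp [pvPairs]

-- ===== VERDICT (by name: the statement is the Claim_ definition above) =====
theorem separate_meteor_sequences_spec : Claim_equal_separate_meteor_sequences := by
  intro tl fb _ hpre
  unfold Spec_separate_meteor_sequences
  exact pvPorts_eq tl fb hpre.1
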